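-- pv_equiv track=rewrite | github.com/asthtls/coding_test | Programmers/lv1/크기가작은부분문자열.py | solution
-- ===== SOURCE A (Python) =====
-- def solution(t, p):
--     p_len = len(p)
--     cnt = 0
--     for i in range(len(t) - p_len + 1):
--         temp = t[i:i+p_len]
--
--         if int(temp) <= int(p):
--             cnt += 1
--
--
--     return cnt
-- ===== SOURCE B (Python) =====
-- def solution(t, p):
--     L = len(p)
--     if len(t) < L:
--         return 0
--     target = int(p)
--     cnt = 0
--     cur = t
--     while len(cur) >= L:
--         if int(cur[:L]) <= target:
--             cnt += 1
--         cur = cur[1:]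
--     return cnt
-- ===== Notes on version B (the rewrite author's own statement) =====
-- stated objective: alternative
-- what changed: Replaces A's index loop that slices t[i:i+L] and re-parses int(p) on every iteration with a while loop that consumes the string suffix by suffix (cur = cur[1:]), parses the target int(p) once before the loop, and compares each leading window int(cur[:L]) against it.
import Mathlib
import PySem

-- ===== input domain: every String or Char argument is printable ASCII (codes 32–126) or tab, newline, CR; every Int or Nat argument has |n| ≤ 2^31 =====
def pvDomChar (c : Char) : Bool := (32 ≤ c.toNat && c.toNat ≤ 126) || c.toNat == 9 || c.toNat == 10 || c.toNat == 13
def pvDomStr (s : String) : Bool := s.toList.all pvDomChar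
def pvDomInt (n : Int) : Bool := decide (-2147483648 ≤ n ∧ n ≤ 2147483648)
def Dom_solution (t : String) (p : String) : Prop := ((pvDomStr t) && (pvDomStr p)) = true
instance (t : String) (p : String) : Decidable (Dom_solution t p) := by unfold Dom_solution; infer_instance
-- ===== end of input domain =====

-- B keeps A's return value but walks the text suffix by suffix and parses the pattern once,
-- instead of A's index loop that slices t[i:i+L] and re-parses int(p) in every iteration.

-- ===== PORT A =====
-- int(s) is ported as (PySem.Int.ofStr? s).getD 0; the `none` (ValueError) case is excluded by Pre_solution.
def solution (t : String) (p : String) : Int :=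
  (PySem.List.pyRange 0 (PySem.Str.len t - PySem.Str.len p + 1) 1).foldl
    (fun cnt i =>
      if (PySem.Int.ofStr? (PySem.Str.slice t (some i) (some (i + PySem.Str.len p)))).getD 0
          ≤ (PySem.Int.ofStr? p).getD 0 then cnt + 1 else cnt)
    0

-- ===== PORT B =====
-- the while loop of Source B: `cur` is consumed one character per iteration (cur = cur[1:]);
-- int(s) again ported as (PySem.Int.ofStr? s).getD 0 (none excluded by Pre_solution).
def bLoop (L : Nat) (target : Int) : List Char → Int → Int
  | [], cnt => cnt
  | c :: rest, cnt =>
    if L ≤ (c :: rest).length then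
      bLoop L target rest
        (if (PySem.Int.ofStr? (String.ofList ((c :: rest).take L))).getD 0 ≤ target then cnt + 1
         else cnt)
    else cnt

def solution_alt (t : String) (p : String) : Int :=
  if t.toList.length < p.toList.length then 0
  else bLoop p.toList.length ((PySem.Int.ofStr? p).getD 0) t.toList 0

-- ===== PRECONDITION & SPEC =====
-- Pre_ excludes exactly the inputs where the Python raises ValueError: whenever at least one
-- window exists, int(p) and int of every length-L window of t must parse.
def Pre_solution (t : String) (p : String) : Prop :=
  PySem.Str.len t < PySem.Str.len p ∨
    ((PySem.Int.ofStr? p).isSome = true ∧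
      ∀ i ∈ List.range (t.toList.length - p.toList.length + 1),
        (PySem.Int.ofChars? ((t.toList.drop i).take p.toList.length)).isSome = true)
instance (t : String) (p : String) : Decidable (Pre_solution t p) := by
  unfold Pre_solution; infer_instance

def pvWitness_solution : String × String := ("3141592", "271")

def Spec_solution (t : String) (p : String) (out : Int) : Prop := out = solution_alt t p
instance (t : String) (p : String) (out : Int) : Decidable (Spec_solution t p out) := by
  unfold Spec_solution; infer_instance

-- ===== CLAIM (what is proved, stated in full; the proofs are below) =====
def Claim_equal_solution : Prop := ∀ (t : String) (p : String), Dom_solution t p → Pre_solution t p → Spec_solution t p (solution t p)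

-- ===== LEMMAS AND PROOFS =====

-- too-short input: B's loop does not fire
theorem bLoop_of_lt (L : Nat) (target : Int) (cs : List Char) (cnt : Int)
    (h : cs.length < L) : bLoop L target cs cnt = cnt := by
  cases cs with
  | nil => rfl
  | cons c rest => simp only [bLoop, if_neg (by omega : ¬ L ≤ (c :: rest).length)]

-- A's counting fold over window start indices equals B's suffix-walking loop
theorem fold_range_eq_bLoop (L : Nat) (target : Int) (cs : List Char) (cnt : Int)
    (h1 : 1 ≤ L) (hL : L ≤ cs.length) :
    (List.range (cs.length - L + 1)).foldl
      (fun cnt i =>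
        if (PySem.Int.ofChars? ((cs.drop i).take L)).getD 0 ≤ target then cnt + 1 else cnt)
      cnt = bLoop L target cs cnt := by
  induction cs generalizing cnt with
  | nil => simp only [List.length_nil] at hL; omega
  | cons c rest ih =>
    have hcons : L ≤ (c :: rest).length := hL
    simp only [bLoop, if_pos hcons, PySem.Int.ofStr?_ofList]
    by_cases hrest : L ≤ rest.length
    · have h3 : (c :: rest).length - L + 1 = (rest.length - L + 1) + 1 := by
        simp only [List.length_cons]; omega
      rw [h3, List.range_succ_eq_map, List.foldl_cons, List.foldl_map]
      simp only [List.drop_zero, List.drop_succ_cons]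
      exact ih _ hrest
    · have h3 : (c :: rest).length - L + 1 = 0 + 1 := by
        simp only [List.length_cons]; omega
      rw [h3, List.range_succ_eq_map, List.range_zero, List.map_nil,
        List.foldl_cons, List.foldl_nil]
      rw [bLoop_of_lt L target rest _ (by omega)]
      simp only [List.drop_zero]
      rfl

-- a port-level restatement of A's loop body: the slice t[i:i+L] is the window (drop i).take L
theorem body_eq (t : String) (p : String) :
    (fun (cnt : Int) (i : Nat) =>
      if (PySem.Int.ofStr? (PySem.Str.slice t (some (i : Int))
            (some ((i : Int) + PySem.Str.len p)))).getD 0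
          ≤ (PySem.Int.ofStr? p).getD 0 then cnt + 1 else cnt)
    = (fun (cnt : Int) (i : Nat) =>
        if (PySem.Int.ofChars? ((t.toList.drop i).take p.toList.length)).getD 0
            ≤ (PySem.Int.ofStr? p).getD 0 then cnt + 1 else cnt) := by
  funext cnt i
  have hslice : (PySem.Str.slice t (some (i : Int)) (some ((i : Int) + PySem.Str.len p))).toList
      = (t.toList.drop i).take p.toList.length := by
    rw [PySem.Str.toList_slice, PySem.Chars.slice_eq_listSlice]
    simp only [PySem.Str.len_eq]
    exact PySem.List.slice_natCast_add t.toList i p.toList.length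
  rw [PySem.Int.ofStr?.eq_1, hslice]

-- the empty pattern is excluded by Pre_ (int("") raises) whenever a window exists
theorem pre_gives_len (t : String) (p : String) (hpre : Pre_solution t p)
    (h : ¬ t.toList.length < p.toList.length) : 1 ≤ p.toList.length := by
  rcases hpre with h1 | ⟨_, h2⟩
  · simp only [PySem.Str.len_eq] at h1; omega
  · by_contra hz
    have hL0 : p.toList.length = 0 := by omega
    have := h2 0 (by simp [List.mem_range])
    rw [hL0] at this
    simp only [List.take_zero] at this
    exact absurd this (by decide)

-- the two ports agree on every input admitted by Pre_solution
theorem solution_eq_alt (t : String) (p : String) (hpre : Pre_solution t p) :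
    solution t p = solution_alt t p := by
  unfold solution solution_alt
  by_cases h : t.toList.length < p.toList.length
  · rw [if_pos h]
    rw [PySem.List.pyRange_one_eq_nil (by simp only [PySem.Str.len_eq]; omega)]
    rfl
  · rw [if_neg h]
    have h1 : 1 ≤ p.toList.length := pre_gives_len t p hpre h
    have hcast : PySem.Str.len t - PySem.Str.len p + 1
        = ((t.toList.length - p.toList.length + 1 : Nat) : Int) := by
      simp only [PySem.Str.len_eq]; omega
    rw [hcast, PySem.List.pyRange_zero_natCast, List.foldl_map]
    rw [body_eq t p]
    exact fold_range_eq_bLoop p.toList.length ((PySem.Int.ofStr? p).getD 0) t.toList 0 h1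
      (by omega)

-- ===== VERDICT (by name: the statement is the Claim_ definition above) =====
theorem solution_spec : Claim_equal_solution := by
  intro t p _ hpre
  exact solution_eq_alt t p hpre
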